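-- pv_equiv track=rewrite | github.com/jon-batscha/klaviyo-extraction-sdk | utils.py | timestamp_ranges
-- ===== SOURCE A (Python) =====
-- def timestamp_ranges(low,high,threads):
--     '''
--     input: start/end timestamps (inclusive), and # of threads
--     return: n ranges (# threads), ascending
--     '''
--
--     low = max(int(low),0)
--
--     step = (high-low)//threads
--
--     extra_step = (high-low)%threads
--
--     steps = [step]*(threads-1) + [step+extra_step]
--
--     ranges = []
--
--     current_start = low
--
--     for current_step in steps:
--
--         current_end = current_start + current_step - 1
--
--         current_range = (current_start,current_end)
--
--         ranges.append(current_range)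
--
--         current_start = current_end + 1
--
--     return ranges
-- ===== SOURCE B (Python) =====
-- def timestamp_ranges(low, high, threads):
--     low = max(int(low), 0)
--     step = (high - low) // threads
--     return [(low + i * step, low + (i + 1) * step - 1) for i in range(threads - 1)] \
--         + [(low + (threads - 1) * step, high - 1)]
-- ===== Notes on version B (the rewrite author's own statement) =====
-- stated objective: simpler
-- what changed: B replaces A's loop that threads current_start through a [step]*(threads-1)+[step+extra] list with a closed-form comprehension low+i*step for each index (the modulo/extra-step bookkeeping disappears: the last range just ends at high-1).
-- outside the precondition, e.g. on timestamp_ranges(0, 10, 0): A raises ZeroDivisionError, B raises ZeroDivisionError; on timestamp_ranges(0, 10, -3): A returns [(0, -7)], B returns [(16, 9)]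
import Mathlib
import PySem

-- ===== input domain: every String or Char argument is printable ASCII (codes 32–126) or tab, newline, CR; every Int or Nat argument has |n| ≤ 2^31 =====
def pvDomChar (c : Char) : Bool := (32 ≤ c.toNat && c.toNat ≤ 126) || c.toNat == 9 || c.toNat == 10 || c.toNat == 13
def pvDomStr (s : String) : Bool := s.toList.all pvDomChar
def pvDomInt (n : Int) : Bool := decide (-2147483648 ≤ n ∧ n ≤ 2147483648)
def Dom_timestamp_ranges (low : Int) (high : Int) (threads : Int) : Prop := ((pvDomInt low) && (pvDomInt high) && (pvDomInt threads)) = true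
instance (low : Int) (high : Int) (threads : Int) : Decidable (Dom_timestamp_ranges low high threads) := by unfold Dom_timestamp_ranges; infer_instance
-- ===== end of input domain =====

-- B computes each range by the closed form low + i*step instead of A's accumulated current_start
-- and extra-step list (objective: simpler). Equivalence is claimed for threads ≥ 1.

-- ===== PORT A =====
def timestamp_ranges (low : Int) (high : Int) (threads : Int) : List (Int × Int) :=
  let low := max low 0
  let step := PySem.Int.floordiv (high - low) threads
  let extra_step := PySem.Int.mod (high - low) threads
  let steps := List.replicate (threads - 1).toNat step ++ [step + extra_step]
  let r := steps.foldl (fun (st : List (Int × Int) × Int) current_step =>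
      (st.1 ++ [(st.2, st.2 + current_step - 1)], st.2 + current_step)) ([], low)
  r.1

-- ===== PORT B =====
def timestamp_ranges_alt (low : Int) (high : Int) (threads : Int) : List (Int × Int) :=
  let low := max low 0
  let step := PySem.Int.floordiv (high - low) threads
  ((PySem.List.pyRange 0 (threads - 1) 1).map
      (fun i => (low + i * step, low + (i + 1) * step - 1)))
    ++ [(low + (threads - 1) * step, high - 1)]

-- ===== PRECONDITION & SPEC =====
-- Pre_ excludes threads ≤ 0: at threads = 0 A raises ZeroDivisionError; negative thread
-- counts are outside the natural domain (A's single-range value there is an accident of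
-- Python's negative list multiplication).
def Pre_timestamp_ranges (low : Int) (high : Int) (threads : Int) : Prop := 1 ≤ threads
instance (low : Int) (high : Int) (threads : Int) : Decidable (Pre_timestamp_ranges low high threads) := by unfold Pre_timestamp_ranges; infer_instance
def pvWitness_timestamp_ranges : Int × Int × Int := (0, 10, 3)

def Spec_timestamp_ranges (low : Int) (high : Int) (threads : Int) (out : List (Int × Int)) : Prop := out = timestamp_ranges_alt low high threads
instance (low : Int) (high : Int) (threads : Int) (out : List (Int × Int)) : Decidable (Spec_timestamp_ranges low high threads out) := by unfold Spec_timestamp_ranges; infer_instance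

-- ===== CLAIM (what is proved, stated in full; the proofs are below) =====
def Claim_equal_timestamp_ranges : Prop := ∀ (low : Int) (high : Int) (threads : Int), Dom_timestamp_ranges low high threads → Pre_timestamp_ranges low high threads → Spec_timestamp_ranges low high threads (timestamp_ranges low high threads)

-- ===== LEMMAS AND PROOFS =====

-- A's loop over n copies of the same step, in closed form.
theorem tr_foldl_replicate (s : Int) : ∀ (n : ℕ) (cur : Int) (acc : List (Int × Int)),
    (List.replicate n s).foldl (fun (st : List (Int × Int) × Int) current_step =>
        (st.1 ++ [(st.2, st.2 + current_step - 1)], st.2 + current_step)) (acc, cur)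
      = (acc ++ (List.range n).map (fun (i : ℕ) => (cur + (i : Int) * s, cur + ((i : Int) + 1) * s - 1)), cur + n * s) := by
  intro n
  induction n with
  | zero => intro cur acc; simp
  | succ n ih =>
      intro cur acc
      rw [List.replicate_succ, List.foldl_cons, ih]
      rw [List.range_succ_eq_map]
      simp only [Prod.mk.injEq, List.map_cons, List.map_map, List.append_assoc, Nat.cast_zero]
      constructor
      · congr 1
        norm_num
        intro a _
        constructor <;> ring
      · push_cast; ring

theorem timestamp_ranges_spec : Claim_equal_timestamp_ranges := by
  intro low high threads _ hpre
  unfold Pre_timestamp_ranges at hpre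
  unfold Spec_timestamp_ranges timestamp_ranges timestamp_ranges_alt
  simp only []
  set l := max low 0 with hl
  set s := PySem.Int.floordiv (high - l) threads with hs
  set e := PySem.Int.mod (high - l) threads with he
  have hcast : ((threads - 1).toNat : Int) = threads - 1 := by omega
  rw [List.foldl_append, tr_foldl_replicate]
  simp only [List.foldl_cons, List.foldl_nil]
  rw [PySem.List.pyRange_one]
  simp only [List.map_map, Int.sub_zero]
  congr 1
  · rw [List.nil_append]
    apply List.map_congr_left
    intro i _
    simp only [Function.comp_apply, Prod.mk.injEq]
    constructor <;> ring
  · have hid : s * threads + e = high - l := PySem.Int.floordiv_mul_add_mod (high - l) threads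
    rw [hcast]
    simp only [List.cons.injEq, Prod.mk.injEq, true_and, and_true]
    linarith
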